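-- pv_equiv track=rewrite | github.com/yizt/notebook | yxs/demo79.py | replace_dot_in_double_quote
-- ===== SOURCE A (Python) =====
-- def replace_dot_in_double_quote(string):
--     """
--     将双引号里面的逗号替换为中文的
--     :param string:
--     :return:
--     """
--     char_list = []
--     in_double_quote = False
--     for c in string:
--         if c == ',' and in_double_quote:
--             c = '，'
--         if c == '\"':
--             in_double_quote = not in_double_quote
--         char_list.append(c)
--     return ''.join(char_list)
-- ===== SOURCE B (Python) =====
-- def replace_dot_in_double_quote(string):
--     parts = string.split('"')
--     return '"'.join(p.replace(',', '\uff0c') if i % 2 == 1 else p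
--                     for i, p in enumerate(parts))
-- ===== Notes on version B (the rewrite author's own statement) =====
-- stated objective: simpler
-- what changed: Replaces the per-character boolean state machine with split-on-quote, replace commas in every odd-index (inside-quote) segment, and join back with quotes.
import Mathlib
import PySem

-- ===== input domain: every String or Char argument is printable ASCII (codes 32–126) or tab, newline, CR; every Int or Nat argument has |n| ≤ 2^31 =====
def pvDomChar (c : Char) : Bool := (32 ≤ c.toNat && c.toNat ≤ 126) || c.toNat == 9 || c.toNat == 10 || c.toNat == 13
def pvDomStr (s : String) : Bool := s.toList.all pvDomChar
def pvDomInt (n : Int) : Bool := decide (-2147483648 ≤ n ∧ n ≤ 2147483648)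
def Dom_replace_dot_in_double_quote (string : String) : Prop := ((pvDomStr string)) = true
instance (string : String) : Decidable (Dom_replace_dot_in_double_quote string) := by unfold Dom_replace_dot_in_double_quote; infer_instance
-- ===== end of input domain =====

-- B replaces A's per-character boolean state machine by split on '"', comma-replace in odd-index
-- (inside-quote) segments, re-join with '"' — simpler decomposition, same result.

-- ===== PORT A =====
-- A: loop over the characters with an accumulator list and an in_double_quote flag; ''.join at the end.
def replace_dot_in_double_quote (string : String) : String :=
  let r := string.toList.foldl
    (fun (st : List Char × Bool) c =>
      let c1 := if c = ',' ∧ st.2 = true then '，' else c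
      let q := if c1 = '"' then !st.2 else st.2
      (st.1 ++ [c1], q))
    ([], false)
  -- ''.join(char_list), each element a one-character string
  String.ofList (PySem.Chars.join [] (r.1.map (fun c => [c])))

-- ===== PORT B =====
-- B: string.split('"'); replace ',' in odd-index parts; '"'.join.
def replace_dot_in_double_quote_alt (string : String) : String :=
  match PySem.Str.split? string "\"" with
  | none => ""   -- unreachable: the separator "\"" is nonempty
  | some parts =>
      PySem.Str.join "\"" ((PySem.List.enumerate parts).map
        (fun ip => if PySem.Int.mod ip.1 2 = 1 then PySem.Str.replace ip.2 "," "，" else ip.2))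

-- ===== PRECONDITION & SPEC =====
def Spec_replace_dot_in_double_quote (string : String) (out : String) : Prop := out = replace_dot_in_double_quote_alt string
instance (string : String) (out : String) : Decidable (Spec_replace_dot_in_double_quote string out) := by unfold Spec_replace_dot_in_double_quote; infer_instance

-- ===== CLAIM (what is proved, stated in full; the proofs are below) =====
def Claim_equal_replace_dot_in_double_quote : Prop := ∀ (string : String), Dom_replace_dot_in_double_quote string → Spec_replace_dot_in_double_quote string (replace_dot_in_double_quote string)

-- ===== LEMMAS AND PROOFS =====

-- structural form of split-on-'"'
def splitQ : List Char → List (List Char)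
  | [] => [[]]
  | c :: cs =>
    if c = '"' then [] :: splitQ cs
    else match splitQ cs with
      | [] => [[c]]
      | p :: ps => (c :: p) :: ps

-- structural form of replace(',', '，')
def commaRepl (cs : List Char) : List Char :=
  cs.flatMap (fun c => if c = ',' then ['，'] else [c])

-- structural form of A's loop (result list, given the current flag)
def loopA : List Char → Bool → List Char
  | [], _ => []
  | c :: cs, b =>
    let c1 := if c = ',' ∧ b = true then '，' else c
    c1 :: loopA cs (if c1 = '"' then !b else b)

-- odd/even alternating map (flag = current part is inside quotes)
def bmap {α : Type} (f : α → α) : Bool → List α → List α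
  | _, [] => []
  | b, x :: xs => (if b then f x else x) :: bmap f (!b) xs

lemma splitQ_ne_nil (cs : List Char) : splitQ cs ≠ [] := by
  cases cs with
  | nil => simp [splitQ]
  | cons c cs =>
    simp only [splitQ]
    split
    · simp
    · cases h : splitQ cs <;> simp

lemma replace_go_comma : ∀ (l : List Char) (fuel : Nat) (acc : List Char), l.length ≤ fuel →
    PySem.Chars.replace.go [','] ['，'] fuel l acc = acc.reverse ++ commaRepl l := by
  intro l
  induction l with
  | nil =>
    intro fuel acc _
    cases fuel <;> simp [PySem.Chars.replace.go, commaRepl]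
  | cons c t ih =>
    intro fuel acc hle
    cases fuel with
    | zero => simp at hle
    | succ f =>
      simp only [List.length_cons, Nat.add_le_add_iff_right] at hle
      by_cases hc : c = ','
      · subst hc
        simp only [PySem.Chars.replace.go, List.isPrefixOf, BEq.rfl, Bool.true_and,
          if_true, List.length_cons, List.length_nil,
          List.drop_succ_cons, List.drop_zero, List.reverse_cons, List.reverse_nil,
          List.nil_append]
        rw [show (['，'] ++ acc : List Char) = '，' :: acc from rfl, ih f ('，' :: acc) hle]
        simp [commaRepl]
      · have hbc : (',' == c) = false := by simpa using fun h => hc h.symm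
        simp only [PySem.Chars.replace.go, List.isPrefixOf, hbc, Bool.false_and,
          Bool.false_eq_true, if_false]
        rw [ih f (c :: acc) hle]
        simp [commaRepl, hc]

lemma splitOn_go_quote : ∀ (l : List Char) (fuel : Nat) (cur : List Char) (acc : List (List Char)),
    l.length ≤ fuel →
    PySem.Chars.splitOn.go ['"'] fuel l cur acc =
      acc.reverse ++ (match splitQ l with
                      | [] => []
                      | p :: ps => (cur.reverse ++ p) :: ps) := by
  intro l
  induction l with
  | nil =>
    intro fuel cur acc _
    cases fuel <;> simp [PySem.Chars.splitOn.go, splitQ]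
  | cons c t ih =>
    intro fuel cur acc hle
    cases fuel with
    | zero => simp at hle
    | succ f =>
      simp only [List.length_cons, Nat.add_le_add_iff_right] at hle
      by_cases hc : c = '"'
      · subst hc
        simp only [PySem.Chars.splitOn.go, List.isPrefixOf, BEq.rfl, Bool.true_and,
          if_true, List.length_cons, List.length_nil,
          List.drop_succ_cons, List.drop_zero]
        rw [ih f [] (cur.reverse :: acc) hle]
        have hne := splitQ_ne_nil t
        cases hsq : splitQ t with
        | nil => exact absurd hsq hne
        | cons p ps => simp [splitQ, hsq]
      · have hbc : ('"' == c) = false := by simpa using fun h => hc h.symm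
        simp only [PySem.Chars.splitOn.go, List.isPrefixOf, hbc, Bool.false_and,
          Bool.false_eq_true, if_false]
        rw [ih f (c :: cur) acc hle]
        have hne := splitQ_ne_nil t
        cases hsq : splitQ t with
        | nil => exact absurd hsq hne
        | cons p ps => simp [splitQ, hsq, hc]

lemma foldA (cs : List Char) : ∀ (acc : List Char) (b : Bool),
    (cs.foldl
      (fun (st : List Char × Bool) c =>
        let c1 := if c = ',' ∧ st.2 = true then '，' else c
        let q := if c1 = '"' then !st.2 else st.2
        (st.1 ++ [c1], q))
      (acc, b)).1 = acc ++ loopA cs b := by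
  induction cs with
  | nil => intro acc b; simp [loopA]
  | cons c t ih =>
    intro acc b
    simp only [List.foldl_cons, loopA]
    rw [ih]
    simp

lemma enumerate_map_g {α β : Type} (g : α → β) : ∀ (xs : List α) (s : Int),
    PySem.List.enumerate (xs.map g) s = (PySem.List.enumerate xs s).map (fun p => (p.1, g p.2)) := by
  intro xs
  induction xs with
  | nil => intro s; simp [PySem.List.enumerate_nil]
  | cons x t ih => intro s; simp [PySem.List.enumerate_cons, ih]

lemma enumerate_map_mod {α : Type} (f : α → α) : ∀ (xs : List α) (s : Int), 0 ≤ s →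
    (PySem.List.enumerate xs s).map (fun ip => if PySem.Int.mod ip.1 2 = 1 then f ip.2 else ip.2)
      = bmap f (decide (PySem.Int.mod s 2 = 1)) xs := by
  intro xs
  induction xs with
  | nil => intro s _; simp [PySem.List.enumerate_nil, bmap]
  | cons x t ih =>
    intro s hs
    rw [PySem.List.enumerate_cons, List.map_cons, ih (s + 1) (by omega)]
    have h2 : (0:Int) < 2 := by norm_num
    rw [PySem.Int.mod_eq_emod_of_pos (a := s) h2, PySem.Int.mod_eq_emod_of_pos (a := s+1) h2]
    by_cases h : s % 2 = 1
    · have h1 : (s + 1) % 2 ≠ 1 := by omega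
      simp [bmap, h, h1]
    · have h1 : (s + 1) % 2 = 1 := by omega
      simp [bmap, h, h1]

lemma join_head_cons (sep : List Char) (x : Char) (h : List Char) (t : List (List Char)) :
    PySem.Chars.join sep ((x :: h) :: t) = x :: PySem.Chars.join sep (h :: t) := by
  cases t with
  | nil => simp [PySem.Chars.join_singleton]
  | cons a t => rw [PySem.Chars.join_cons_cons, PySem.Chars.join_cons_cons]; simp

lemma core : ∀ (cs : List Char) (b : Bool),
    PySem.Chars.join ['"'] (bmap commaRepl b (splitQ cs)) = loopA cs b := by
  intro cs
  induction cs with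
  | nil =>
    intro b
    cases b <;> simp [splitQ, bmap, commaRepl, loopA, PySem.Chars.join_singleton]
  | cons c t ih =>
    intro b
    have hne := splitQ_ne_nil t
    cases hsq : splitQ t with
    | nil => exact absurd hsq hne
    | cons p ps =>
      by_cases hc : c = '"'
      · subst hc
        have hIH := ih (!b)
        rw [hsq] at hIH
        simp only [splitQ, hsq, if_pos trivial, bmap]
        rw [PySem.Chars.join_cons_cons]
        rw [show ((if (!b) = true then commaRepl p else p) :: bmap commaRepl (!!b) ps)
              = bmap commaRepl (!b) (p :: ps) from rfl, hIH]
        simp [loopA, commaRepl]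
      · have hIH := ih b
        rw [hsq] at hIH
        simp only [splitQ, hc, if_false, hsq, bmap]
        have hh : (if b = true then commaRepl (c :: p) else c :: p)
            = (if c = ',' ∧ b = true then '，' else c) :: (if b = true then commaRepl p else p) := by
          cases b <;> by_cases hcc : c = ',' <;> simp [commaRepl, hcc]
        rw [hh, join_head_cons]
        rw [show ((if b = true then commaRepl p else p) :: bmap commaRepl (!b) ps)
              = bmap commaRepl b (p :: ps) from rfl, hIH]
        have hcq : (if c = ',' ∧ b = true then '，' else c) ≠ '"' := by
          by_cases hcc : c = ',' <;> cases b <;> simp [hcc] <;> exact hc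
        simp only [loopA, if_neg hcq]

lemma splitOn_quote (cs : List Char) : PySem.Chars.splitOn cs ['"'] = splitQ cs := by
  unfold PySem.Chars.splitOn
  rw [splitOn_go_quote cs (cs.length + 1) [] [] (by omega)]
  have hne := splitQ_ne_nil cs
  cases hsq : splitQ cs with
  | nil => exact absurd hsq hne
  | cons p ps => simp

lemma replace_comma (p : List Char) : PySem.Chars.replace p [','] ['，'] = commaRepl p := by
  unfold PySem.Chars.replace
  simp only [List.isEmpty_cons, Bool.false_eq_true, if_false]
  rw [replace_go_comma p p.length [] le_rfl]
  simp

-- ===== VERDICT (by name: the statement is the Claim_ definition above) =====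
theorem replace_dot_in_double_quote_spec : Claim_equal_replace_dot_in_double_quote := by
  intro s _
  show replace_dot_in_double_quote s = replace_dot_in_double_quote_alt s
  unfold replace_dot_in_double_quote replace_dot_in_double_quote_alt
  dsimp only
  rw [foldA s.toList [] false]
  rw [show PySem.Str.split? s "\"" = some ((splitQ s.toList).map String.ofList) by
        simp [PySem.Str.split?, PySem.Chars.split?, splitOn_quote]]
  simp only [List.nil_append]
  rw [show PySem.Chars.join [] ((loopA s.toList false).map (fun c => [c])) = loopA s.toList false
        from PySem.Chars.join_nil_singletons _]
  rw [enumerate_map_g String.ofList (splitQ s.toList) 0, List.map_map]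
  have hmapfn : ((fun ip => if PySem.Int.mod ip.1 2 = 1 then PySem.Str.replace ip.2 "," "，" else ip.2) ∘
        (fun p : Int × List Char => (p.1, String.ofList p.2)))
      = (fun p : Int × List Char =>
          String.ofList (if PySem.Int.mod p.1 2 = 1 then commaRepl p.2 else p.2)) := by
    funext p
    simp only [Function.comp_apply]
    have hrep : PySem.Str.replace (String.ofList p.2) "," "，" = String.ofList (commaRepl p.2) := by
      unfold PySem.Str.replace
      rw [show ("," : String).toList = [','] from rfl,
          show ("，" : String).toList = ['，'] from rfl,
          show (String.ofList p.2).toList = p.2 by simp, replace_comma]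
    rw [hrep, ← apply_ite String.ofList]
  rw [hmapfn]
  rw [show (fun p : Int × List Char =>
          String.ofList (if PySem.Int.mod p.1 2 = 1 then commaRepl p.2 else p.2))
        = String.ofList ∘ (fun p : Int × List Char =>
            if PySem.Int.mod p.1 2 = 1 then commaRepl p.2 else p.2) from rfl,
      ← List.map_map]
  rw [enumerate_map_mod commaRepl (splitQ s.toList) 0 le_rfl]
  have h0 : decide (PySem.Int.mod 0 2 = 1) = false := by decide
  rw [h0]
  rw [show PySem.Str.join "\"" ((bmap commaRepl false (splitQ s.toList)).map String.ofList)
        = String.ofList (PySem.Chars.join ['"'] (bmap commaRepl false (splitQ s.toList))) by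
        simp [PySem.Str.join, List.map_map, Function.comp_def]]
  rw [core s.toList false]
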